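-- pv_equiv track=rewrite | github.com/ThinkLabWC/Algorithm | Week01/cheonkyu/160586.py | solution
-- ===== SOURCE A (Python) =====
-- def findKey(keymaps, char):
--     result = 9999
--     for keymap in keymaps:
--         i = (keymap.index(char) if char in keymap else 9999) + 1
--         result = min([i, result])
--
--     return result
--
-- def solution(keymaps, targets):
--     answer = []
--     charDic = {}
--     for target in targets:
--         count = 0
--         for i in range(0, len(target)):
--             char = target[i]
--             if charDic.get(char) == None:
--               step = findKey(keymaps, char)
--               charDic[char] = step
--             count += charDic[char]
--         answer.append(count)
--     answer = list(map(lambda x: -1 if x >= 9999 else x, answer))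
--     return answer
-- ===== SOURCE B (Python) =====
-- def solution(keymaps, targets):
--     # Build the full char -> minimal press-count table in one eager pass.
--     cost = {}
--     for keymap in keymaps:
--         for i, c in enumerate(keymap):
--             if c not in cost or i + 1 < cost[c]:
--                 cost[c] = i + 1
--     answer = []
--     for target in targets:
--         total = sum(min(cost.get(c, 9999), 9999) for c in target)
--         answer.append(-1 if total >= 9999 else total)
--     return answer
-- ===== Notes on version B (the rewrite author's own statement) =====
-- stated objective: simpler
-- what changed: A lazily memoises a per-character scan over all keymaps (findKey called on demand inside the target loop); B builds the complete char-to-minimal-press-cost table once in a single eager pass over the keymaps (enumerate + keep-the-minimum), then computes each target's answer by a plain summation over the table.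
import Mathlib
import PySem

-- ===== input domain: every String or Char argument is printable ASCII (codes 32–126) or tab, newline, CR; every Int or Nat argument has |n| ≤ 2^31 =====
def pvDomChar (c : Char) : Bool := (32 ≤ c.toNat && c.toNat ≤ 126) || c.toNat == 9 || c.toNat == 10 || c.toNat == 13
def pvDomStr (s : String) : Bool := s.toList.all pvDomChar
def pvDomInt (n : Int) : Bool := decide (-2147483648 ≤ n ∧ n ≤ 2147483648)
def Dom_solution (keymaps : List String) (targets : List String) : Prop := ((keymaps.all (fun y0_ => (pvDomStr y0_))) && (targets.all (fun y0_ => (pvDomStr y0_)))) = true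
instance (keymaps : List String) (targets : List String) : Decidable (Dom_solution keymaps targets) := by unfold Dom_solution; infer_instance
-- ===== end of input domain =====

-- B replaces A's per-character lazily-memoised keymap scanning by one eager char→min-cost
-- table built in a single pass over the keymaps, then a plain summation pass (simpler).

-- ===== PORT A =====
def findKey (keymaps : List String) (char : Char) : Int :=
  keymaps.foldl (fun result keymap =>
    let i : Int := (if keymap.toList.contains char then ((keymap.toList.idxOf char : Nat) : Int) else 9999) + 1
    min i result) 9999

def solStep (keymaps : List String) (p : Int × PySem.Dict Char Int) (char : Char) : Int × PySem.Dict Char Int :=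
  let d1 := match p.2.get? char with
            | none => p.2.insert char (findKey keymaps char)
            | some _ => p.2
  (p.1 + d1.getD char 0, d1)

def solution (keymaps : List String) (targets : List String) : List Int :=
  let r := targets.foldl (fun (st : List Int × PySem.Dict Char Int) target =>
      let q := (PySem.List.pyRange 0 (PySem.Str.len target) 1).foldl
                 (fun p i => solStep keymaps p (PySem.List.pyGetD target.toList i ' ')) (0, st.2)
      (st.1 ++ [q.1], q.2)) ([], PySem.Dict.empty)
  r.1.map (fun x => if x ≥ 9999 then -1 else x)

-- ===== PORT B =====
def tblStep (d : PySem.Dict Char Int) (ic : Int × Char) : PySem.Dict Char Int :=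
  if (match d.get? ic.2 with | none => true | some v => decide (ic.1 + 1 < v)) then d.insert ic.2 (ic.1 + 1) else d

def buildCost (keymaps : List String) : PySem.Dict Char Int :=
  keymaps.foldl (fun d km => (PySem.List.enumerate km.toList 0).foldl tblStep d) PySem.Dict.empty

def solution_alt (keymaps : List String) (targets : List String) : List Int :=
  let cost := buildCost keymaps
  targets.foldl (fun ans target =>
    let total := (target.toList.map (fun c => min (cost.getD c 9999) 9999)).sum
    ans ++ [if total ≥ 9999 then -1 else total]) []

-- ===== PRECONDITION & SPEC =====
def Spec_solution (keymaps : List String) (targets : List String) (out : List Int) : Prop := out = solution_alt keymaps targets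
instance (keymaps : List String) (targets : List String) (out : List Int) : Decidable (Spec_solution keymaps targets out) := by unfold Spec_solution; infer_instance

-- ===== CLAIM (what is proved, stated in full; the proofs are below) =====
def Claim_equal_solution : Prop := ∀ (keymaps : List String) (targets : List String), Dom_solution keymaps targets → Spec_solution keymaps targets (solution keymaps targets)

-- ===== LEMMAS AND PROOFS =====

-- `min a v?` view of B's table entries
def optMin (a : Int) : Option Int → Int
  | none => a
  | some v => min a v

theorem tblStep_get?_self (d : PySem.Dict Char Int) (i : Int) (c : Char) :
    (tblStep d (i, c)).get? c = some (optMin (i + 1) (d.get? c)) := by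
  unfold tblStep optMin
  cases h : d.get? c with
  | none => simp [PySem.Dict.get?_insert_self]
  | some v =>
      by_cases hlt : i + 1 < v
      · simp [hlt, PySem.Dict.get?_insert_self, min_eq_left (le_of_lt hlt)]
      · simp [h, hlt, min_eq_right (by omega : v ≤ i + 1)]

theorem tblStep_get?_ne (d : PySem.Dict Char Int) (i : Int) (c c' : Char) (h : c' ≠ c) :
    (tblStep d (i, c)).get? c' = d.get? c' := by
  cases hg : d.get? c with
  | none => simp [tblStep, hg, PySem.Dict.get?_insert_of_ne _ _ h]
  | some v =>
      by_cases hlt : i + 1 < v <;>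
        simp [tblStep, hg, hlt, PySem.Dict.get?_insert_of_ne _ _ h]

theorem inner_get? (l : List Char) (s : Int) (d : PySem.Dict Char Int) (c : Char) :
    ((PySem.List.enumerate l s).foldl tblStep d).get? c =
      if c ∈ l then some (optMin (s + (l.idxOf c : Nat) + 1) (d.get? c)) else d.get? c := by
  induction l generalizing s d with
  | nil => simp [PySem.List.enumerate_nil]
  | cons x t ih =>
      rw [PySem.List.enumerate_cons]
      simp only [List.foldl_cons]
      rw [ih]
      by_cases hc : c = x
      · subst hc
        by_cases hmem : c ∈ t
        · rw [if_pos hmem, if_pos (by simp), tblStep_get?_self, List.idxOf_cons_self]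
          cases h : d.get? c with
          | none => simp only [optMin]; congr 1; push_cast; omega
          | some v => simp only [optMin]; congr 1; push_cast; omega
        · rw [if_neg hmem, if_pos (by simp), tblStep_get?_self, List.idxOf_cons_self]
          norm_num
      · rw [tblStep_get?_ne d s x c hc]
        by_cases hmem : c ∈ t
        · have hmem' : c ∈ x :: t := List.mem_cons_of_mem _ hmem
          rw [if_pos hmem, if_pos hmem', List.idxOf_cons_ne _ (Ne.symm hc)]
          congr 2
          push_cast
          ring
        · rw [if_neg hmem, if_neg (by simp [hc, hmem])]

theorem buildCost_min (keymaps : List String) (c : Char) :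
    min ((buildCost keymaps).getD c 9999) 9999 = findKey keymaps c := by
  unfold buildCost findKey
  suffices h : ∀ (ks : List String) (d : PySem.Dict Char Int),
      min ((ks.foldl (fun d km => (PySem.List.enumerate km.toList 0).foldl tblStep d) d).getD c 9999) 9999
        = ks.foldl (fun result km =>
            min ((if km.toList.contains c then ((km.toList.idxOf c : Nat) : Int) else 9999) + 1) result)
            (min (d.getD c 9999) 9999) by
    simpa using h keymaps PySem.Dict.empty
  intro ks
  induction ks with
  | nil => intro d; simp
  | cons km rest ih =>
      intro d
      simp only [List.foldl_cons]
      rw [ih]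
      congr 1
      show min (((PySem.List.enumerate km.toList 0).foldl tblStep d).getD c 9999) 9999 = _
      rw [show ∀ (e : PySem.Dict Char Int), e.getD c 9999 = (e.get? c).getD 9999 from fun _ => rfl,
          inner_get?]
      by_cases hmem : c ∈ km.toList
      all_goals rw [show d.getD c 9999 = (d.get? c).getD 9999 from rfl]
      · rw [if_pos hmem, if_pos (List.contains_iff_mem.mpr hmem)]
        cases h : d.get? c with
        | none => simp only [optMin, Option.getD_some, Option.getD_none]; omega
        | some v => simp only [optMin, Option.getD_some]; omega
      · rw [if_neg hmem, if_neg (by simpa [List.contains_iff_mem] using hmem)]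
        cases h : d.get? c with
        | none => simp only [Option.getD_none]; omega
        | some v => simp only [Option.getD_some]; omega

-- memo invariant for A's dictionary: every cached value is findKey's value
def MemoInv (keymaps : List String) (d : PySem.Dict Char Int) : Prop :=
  ∀ c v, d.get? c = some v → v = findKey keymaps c

theorem solStep_chars (keymaps : List String) (l : List Char) :
    ∀ (count : Int) (d : PySem.Dict Char Int), MemoInv keymaps d →
      l.foldl (solStep keymaps) (count, d) =
        (count + (l.map (findKey keymaps)).sum, (l.foldl (solStep keymaps) (count, d)).2)
        ∧ MemoInv keymaps (l.foldl (solStep keymaps) (count, d)).2 := by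
  induction l with
  | nil => intro count d hMemoInv; simpa using hMemoInv
  | cons x t ih =>
      intro count d hMemoInv
      simp only [List.foldl_cons, List.map_cons, List.sum_cons]
      have hstep : solStep keymaps (count, d) x =
          (count + findKey keymaps x, (solStep keymaps (count, d) x).2)
          ∧ MemoInv keymaps (solStep keymaps (count, d) x).2 := by
        unfold solStep
        cases h : d.get? x with
        | none =>
            refine ⟨by simp [PySem.Dict.getD, PySem.Dict.get?_insert_self], ?_⟩
            intro c v hv
            rcases eq_or_ne c x with rfl | hne
            · rw [PySem.Dict.get?_insert_self] at hv; exact (Option.some_inj.mp hv).symm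
            · rw [PySem.Dict.get?_insert_of_ne _ _ hne] at hv; exact hMemoInv c v hv
        | some w =>
            have hw := hMemoInv x w h
            exact ⟨by simp [PySem.Dict.getD, h, hw], hMemoInv⟩
      rcases hstep with ⟨hval, hinv2⟩
      rw [hval]
      obtain ⟨h1, h2⟩ := ih (count + findKey keymaps x) _ hinv2
      refine ⟨?_, h2⟩
      rw [h1]
      congr 1
      ring

-- the per-target loop of A, with the char lookup already bridged to a fold over the chars
def targStep (keymaps : List String) (st : List Int × PySem.Dict Char Int) (target : String) :
    List Int × PySem.Dict Char Int :=
  let q := target.toList.foldl (solStep keymaps) (0, st.2)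
  (st.1 ++ [q.1], q.2)

theorem outerA (keymaps : List String) (ts : List String) :
    ∀ (ans : List Int) (d : PySem.Dict Char Int), MemoInv keymaps d →
      (ts.foldl (targStep keymaps) (ans, d)).1
        = ans ++ ts.map (fun t => (t.toList.map (findKey keymaps)).sum) := by
  induction ts with
  | nil => intro ans d _; simp
  | cons t rest ih =>
      intro ans d hMemoInv
      simp only [List.foldl_cons, List.map_cons]
      obtain ⟨h1, h2⟩ := solStep_chars keymaps t.toList 0 d hMemoInv
      have hstep : targStep keymaps (ans, d) t =
          (ans ++ [(t.toList.map (findKey keymaps)).sum],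
           (t.toList.foldl (solStep keymaps) (0, d)).2) := by
        simp only [targStep]
        rw [h1]
        simp
      rw [hstep, ih _ _ h2]
      simp

theorem solution_eq_map (keymaps : List String) (targets : List String) :
    solution keymaps targets =
      targets.map (fun t =>
        if (t.toList.map (findKey keymaps)).sum ≥ 9999 then -1
        else (t.toList.map (findKey keymaps)).sum) := by
  have hb : (fun (st : List Int × PySem.Dict Char Int) target =>
      let q := (PySem.List.pyRange 0 (PySem.Str.len target) 1).foldl
                 (fun p i => solStep keymaps p (PySem.List.pyGetD target.toList i ' ')) (0, st.2)
      (st.1 ++ [q.1], q.2)) = targStep keymaps := by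
    funext st target
    simp only [targStep, PySem.Str.len_eq]
    rw [PySem.List.foldl_pyRange_zero_pyGetD']
  have hMemoInv : MemoInv keymaps PySem.Dict.empty := by
    intro c v hv
    simp [PySem.Dict.get?, PySem.Dict.empty] at hv
  unfold solution
  rw [hb]
  show ((targets.foldl (targStep keymaps) ([], PySem.Dict.empty)).1).map
      (fun x => if x ≥ 9999 then -1 else x) = _
  rw [outerA keymaps targets [] PySem.Dict.empty hMemoInv]
  simp [List.map_map, Function.comp]

theorem solution_alt_eq_map (keymaps : List String) (targets : List String) :
    solution_alt keymaps targets =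
      targets.map (fun t =>
        if (t.toList.map (findKey keymaps)).sum ≥ 9999 then -1
        else (t.toList.map (findKey keymaps)).sum) := by
  unfold solution_alt
  have h := PySem.List.foldl_append_singleton_eq_map
    (f := fun target : String =>
      let total := (target.toList.map (fun c => min ((buildCost keymaps).getD c 9999) 9999)).sum
      if total ≥ 9999 then (-1 : Int) else total) targets []
  simp only [List.nil_append] at h
  rw [h]
  simp only [buildCost_min]

-- ===== VERDICT (by name: the statement is the Claim_ definition above) =====
theorem solution_spec : Claim_equal_solution := by
  intro keymaps targets _
  unfold Spec_solution
  rw [solution_eq_map, solution_alt_eq_map]
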